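-- pv_equiv track=rewrite | github.com/AbhyanandSharma2005/Dsa-practice-challange | Dsa-day172.py | maxMatrixSum
-- ===== SOURCE A (Python) =====
-- from typing import List
--
-- def maxMatrixSum(matrix: List[List[int]]) -> int:
--     n = len(matrix)
--     total_sum = 0
--     negative_count = 0
--     min_abs_value = float('inf')
--
--     for i in range(n):
--         for j in range(n):
--             value = matrix[i][j]
--             total_sum += abs(value)
--             if value < 0:
--                 negative_count += 1
--             min_abs_value = min(min_abs_value, abs(value))
--
--     if negative_count % 2 == 1:
--         total_sum -= 2 * min_abs_value
--
--     return total_sum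
-- ===== SOURCE B (Python) =====
-- from typing import List
--
-- def maxMatrixSum(matrix: List[List[int]]) -> int:
--     n = len(matrix)
--     vals = sorted(row[j] for row in matrix for j in range(n))
--     k = 0
--     while k < len(vals) and vals[k] < 0:
--         k += 1
--     total = sum(vals[k:]) - sum(vals[:k])
--     if k % 2 == 1:
--         m = -vals[k - 1] if k == len(vals) else min(-vals[k - 1], vals[k])
--         total -= 2 * m
--     return total
-- ===== Notes on version B (the rewrite author's own statement) =====
-- stated objective: alternative
-- what changed: Replaces A's fused double loop with three running accumulators (abs-sum, negative count, running min) by a sort-based algorithm: sort the flattened values, walk the negative prefix to find the zero-crossing index k, get the total as sum(vals[k:]) - sum(vals[:k]) with no abs() at all, and when k is odd read the minimal absolute value directly off the two boundary elements vals[k-1]/vals[k] instead of a min reduction.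
import Mathlib
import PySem

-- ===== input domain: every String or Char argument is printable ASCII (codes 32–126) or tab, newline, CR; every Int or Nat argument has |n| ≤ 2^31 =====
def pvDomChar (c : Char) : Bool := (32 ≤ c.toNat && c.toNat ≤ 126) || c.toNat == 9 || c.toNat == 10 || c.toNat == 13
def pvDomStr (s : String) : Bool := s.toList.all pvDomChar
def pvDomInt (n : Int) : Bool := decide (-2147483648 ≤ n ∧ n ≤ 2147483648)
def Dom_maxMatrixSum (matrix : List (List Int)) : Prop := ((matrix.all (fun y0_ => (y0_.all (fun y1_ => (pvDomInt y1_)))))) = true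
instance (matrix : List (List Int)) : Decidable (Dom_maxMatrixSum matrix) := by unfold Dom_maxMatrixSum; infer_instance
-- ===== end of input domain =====

-- B replaces A's fused index-driven double loop (three running accumulators) with a sort-based
-- algorithm: sort the flattened values, count the negative prefix, take the total as a slice-sum
-- difference (no abs), and read the minimal absolute value off the zero-crossing boundary.


-- ===== PORT A =====
-- loop body of A: total_sum += abs(value); if value < 0: negative_count += 1;
-- min_abs_value = min(min_abs_value, abs(value))  (float('inf') modelled as `none`)
def stepA (s : Int × Int × Option Int) (value : Int) : Int × Int × Option Int :=
  (s.1 + |value|,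
   s.2.1 + (if value < 0 then 1 else 0),
   some (match s.2.2 with
         | none => |value|
         | some m => min m |value|))

-- matrix[i][j] ported as total pyGetD (the IndexError on a too-short row is excluded by Pre_)
def maxMatrixSum (matrix : List (List Int)) : Int :=
  let n : Int := PySem.List.len matrix
  let fin :=
    (PySem.List.pyRange 0 n).foldl
      (fun s i =>
        (PySem.List.pyRange 0 n).foldl
          (fun s2 j => stepA s2 (PySem.List.pyGetD (PySem.List.pyGetD matrix i []) j 0)) s)
      (0, 0, none)
  if PySem.Int.mod fin.2.1 2 == 1 then fin.1 - 2 * fin.2.2.getD 0 else fin.1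

-- ===== PORT B =====
-- the while loop 'k = 0; while k < len(vals) and vals[k] < 0: k += 1' walks the list from the
-- front, so it is transcribed as the structural recursion counting the negative prefix
def negPrefix : List Int → Nat
  | [] => 0
  | v :: t => if v < 0 then negPrefix t + 1 else 0

-- row[j] ported as total pyGetD (the IndexError on a too-short row is excluded by Pre_);
-- the slices vals[k:] / vals[:k] are exact as drop/take because 0 ≤ k ≤ len(vals);
-- vals[k-1] / vals[k] are read via pyGetD at the (in-range) int indices k-1 and k
def maxMatrixSum_alt (matrix : List (List Int)) : Int :=
  let n : Int := PySem.List.len matrix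
  let vals := PySem.List.sorted
    (matrix.flatMap (fun row => (PySem.List.pyRange 0 n).map (fun j => PySem.List.pyGetD row j 0)))
    (fun x => x) false
  let k := negPrefix vals
  let total := (vals.drop k).sum - (vals.take k).sum
  if PySem.Int.mod (k : Int) 2 == 1 then
    let m := if k = vals.length then -(PySem.List.pyGetD vals ((k : Int) - 1) 0)
             else min (-(PySem.List.pyGetD vals ((k : Int) - 1) 0)) (PySem.List.pyGetD vals (k : Int) 0)
    total - 2 * m
  else total

-- ===== PRECONDITION & SPEC =====
-- Pre_ excludes exactly the inputs where the Pythons raise IndexError: some row shorter than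
-- len(matrix) (both read row[j] for every j < len(matrix)).
def Pre_maxMatrixSum (matrix : List (List Int)) : Prop :=
  ∀ row ∈ matrix, matrix.length ≤ row.length
instance (matrix : List (List Int)) : Decidable (Pre_maxMatrixSum matrix) := by
  unfold Pre_maxMatrixSum; infer_instance
def pvWitness_maxMatrixSum : List (List Int) := [[1, -2], [3, 4]]

def Spec_maxMatrixSum (matrix : List (List Int)) (out : Int) : Prop := out = maxMatrixSum_alt matrix
instance (matrix : List (List Int)) (out : Int) : Decidable (Spec_maxMatrixSum matrix out) := by unfold Spec_maxMatrixSum; infer_instance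

-- ===== CLAIM (what is proved, stated in full; the proofs are below) =====
def Claim_equal_maxMatrixSum : Prop := ∀ (matrix : List (List Int)), Dom_maxMatrixSum matrix → Pre_maxMatrixSum matrix → Spec_maxMatrixSum matrix (maxMatrixSum matrix)

-- ===== LEMMAS AND PROOFS =====

-- folding A's loop body over a value list computes the three reductions at once
theorem foldl_stepA (l : List Int) (t c : Int) (m : Option Int) :
    l.foldl stepA (t, c, m) =
      (t + (l.map (fun v => |v|)).sum,
       c + (l.countP (fun v => decide (v < 0)) : Int),
       l.foldl (fun acc v => some (min (acc.getD |v|) |v|)) m) := by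
  induction l generalizing t c m with
  | nil => simp
  | cons v l ih =>
    simp only [List.foldl_cons, stepA, ih, List.map_cons, List.sum_cons, List.countP_cons,
      Prod.mk.injEq]
    refine ⟨by ring, ?_, ?_⟩
    · by_cases h : v < 0
      · simp [h]; omega
      · simp [h]
    · congr 1
      cases m <;> simp

-- the running-min accumulator started at `none` is min? of the abs list
theorem foldl_minAcc (l : List Int) :
    ∀ x : Int, l.foldl (fun acc v => some (min (acc.getD |v|) |v|)) (some x) =
      some ((l.map (fun v => |v|)).foldl min x) := by
  induction l with
  | nil => intro x; simp
  | cons v l ih => intro x; simp [ih]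

theorem foldl_minAcc_none (l : List Int) :
    l.foldl (fun acc v => some (min (acc.getD |v|) |v|)) none =
      (l.map (fun v => |v|)).min? := by
  cases l with
  | nil => simp [List.min?]
  | cons v l => simp [List.min?, foldl_minAcc]

-- B's while loop counts the negative prefix = length of takeWhile (< 0)
theorem negPrefix_eq_takeWhile (l : List Int) :
    negPrefix l = (l.takeWhile (fun v => decide (v < 0))).length := by
  induction l with
  | nil => simp [negPrefix]
  | cons v t ih =>
    by_cases h : v < 0 <;> simp [negPrefix, h, ih]

-- in a ≤-sorted list the last element is maximal
theorem pairwise_le_getLast {l : List Int} (h : l.Pairwise (· ≤ ·)) {x : Int}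
    (hx : x ∈ l) (hne : l ≠ []) : x ≤ l.getLast hne := by
  induction l with
  | nil => cases hx
  | cons a t ih =>
    cases t with
    | nil => simp at hx; simp [hx]
    | cons b t' =>
      rw [List.getLast_cons (by simp)]
      rcases List.mem_cons.mp hx with rfl | hx'
      · exact le_trans (List.rel_of_pairwise_cons h (List.getLast_mem (by simp))) (le_refl _)
      · exact ih h.tail hx' (by simp)

-- in a ≤-sorted list the head is minimal
theorem head_le_of_pairwise {l : List Int} (h : l.Pairwise (· ≤ ·)) {x : Int}
    (hx : x ∈ l) (hne : l ≠ []) : l.head hne ≤ x := by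
  cases l with
  | nil => cases hx
  | cons a t =>
    rcases List.mem_cons.mp hx with rfl | hx'
    · simp
    · exact List.rel_of_pairwise_cons h hx'

-- ===== VERDICT (by name: the statement is the Claim_ definition above) =====
theorem maxMatrixSum_spec : Claim_equal_maxMatrixSum := by
  intro matrix _ _
  unfold Spec_maxMatrixSum maxMatrixSum maxMatrixSum_alt
  -- reduce A's double index loop to a fold over the flattened value list
  set vals0 := matrix.flatMap (fun row => (PySem.List.pyRange 0 (PySem.List.len matrix)).map
      (fun j => PySem.List.pyGetD row j 0)) with hvals0
  have houter :
      (PySem.List.pyRange 0 (PySem.List.len matrix)).foldl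
        (fun s i =>
          (PySem.List.pyRange 0 (PySem.List.len matrix)).foldl
            (fun s2 j => stepA s2 (PySem.List.pyGetD (PySem.List.pyGetD matrix i []) j 0)) s)
        ((0 : Int), (0 : Int), (none : Option Int))
      = matrix.foldl
          (fun s row =>
            (PySem.List.pyRange 0 (PySem.List.len matrix)).foldl
              (fun s2 j => stepA s2 (PySem.List.pyGetD row j 0)) s)
          (0, 0, none) := by
    rw [PySem.List.foldl_pyRange_pyGetD matrix []
        (fun s row =>
          (PySem.List.pyRange 0 (PySem.List.len matrix)).foldl
            (fun s2 j => stepA s2 (PySem.List.pyGetD row j 0)) s)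
        (0, 0, none) (le_refl 0)]
    simp
  have hflat :
      vals0.foldl stepA ((0 : Int), (0 : Int), (none : Option Int))
      = matrix.foldl
          (fun s row =>
            (PySem.List.pyRange 0 (PySem.List.len matrix)).foldl
              (fun s2 j => stepA s2 (PySem.List.pyGetD row j 0)) s)
          (0, 0, none) := by
    rw [hvals0, List.flatMap_def, List.foldl_flatten]
    simp only [List.foldl_map]
  simp only [houter, ← hflat, foldl_stepA, foldl_minAcc_none, zero_add]
  -- B's sorted list and its negative-prefix decomposition
  set s := PySem.List.sorted vals0 (fun x => x) false with hs
  set negp : Int → Bool := fun v => decide (v < 0) with hnegp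
  set p := s.takeWhile negp with hpdef
  set q := s.dropWhile negp with hqdef
  have hpq : p ++ q = s := List.takeWhile_append_dropWhile
  have hperm : s.Perm vals0 := PySem.List.sorted_perm vals0 (fun x => x) false
  have hsort : s.Pairwise (· ≤ ·) := PySem.List.sorted_pairwise vals0 (fun x => x)
  have hsplit := List.pairwise_append.mp (hpq ▸ hsort)
  have hp : ∀ x ∈ p, x < 0 := by
    intro x hx
    simpa [hnegp] using List.mem_takeWhile_imp hx
  have hq : ∀ x ∈ q, 0 ≤ x := by
    intro x hx
    have hne : q ≠ [] := List.ne_nil_of_mem hx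
    have hh : 0 ≤ q.head hne := by
      have := List.head_dropWhile_not negp (l := s) (by rw [← hqdef]; exact hne)
      simp only [hnegp, decide_eq_false_iff_not, not_lt] at this
      exact this
    exact le_trans hh (head_le_of_pairwise hsplit.2.1 hx hne)
  -- the loop count k
  have hk : negPrefix s = p.length := negPrefix_eq_takeWhile s
  -- k equals A's negative count
  have hcount : vals0.countP negp = p.length := by
    rw [← hperm.countP_eq, ← hpq, List.countP_append,
      List.countP_eq_length.mpr (fun x hx => by simpa [hnegp] using hp x hx),
      List.countP_eq_zero.mpr (fun x hx => by simpa [hnegp] using not_lt.mpr (hq x hx))]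
    simp
  -- slice sums equal A's abs-sum
  have htake : s.take p.length = p := by rw [← hpq]; exact List.take_left
  have hdrop : s.drop p.length = q := by rw [← hpq]; exact List.drop_left
  have habsp : p.map (fun v => |v|) = p.map (fun v => -v) :=
    List.map_congr_left (fun x hx => abs_of_neg (hp x hx))
  have habsq : q.map (fun v => |v|) = q := by
    rw [List.map_congr_left (fun x hx => abs_of_nonneg (hq x hx)), List.map_id']
  have hsum : (vals0.map (fun v => |v|)).sum = q.sum - p.sum := by
    rw [← (hperm.map (fun v => |v|)).sum_eq, ← hpq, List.map_append, List.sum_append,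
      habsp, habsq, ← List.sum_neg]
    ring
  simp only [hk, hcount]
  -- both sides test the same parity condition
  by_cases hpar : PySem.Int.mod (p.length : Int) 2 == 1
  · rw [if_pos hpar, if_pos hpar]
    -- odd count: p is nonempty
    have hpne : p ≠ [] := by
      intro hp0
      rw [hp0] at hpar
      simp [PySem.Int.mod] at hpar
    have hplen : 1 ≤ p.length := List.length_pos_iff.mpr hpne
    have hslen : p.length ≤ s.length := by rw [← hpq]; simp
    -- the boundary read vals[k-1]
    have hgetL : PySem.List.pyGetD s ((p.length : Int) - 1) 0 = p.getLast hpne := by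
      rw [show ((p.length : Int) - 1) = ((p.length - 1 : Nat) : Int) by push_cast [hplen]; ring]
      rw [PySem.List.pyGetD_eq_getElem s 0 (by positivity) (by exact_mod_cast by omega)]
      simp only [Int.toNat_natCast]
      have h1 : s[(p.length - 1 : Nat)]? = p[(p.length - 1 : Nat)]? := by
        rw [← hpq]; exact List.getElem?_append_left (by omega)
      rw [List.getElem?_eq_getElem (by omega), List.getElem?_eq_getElem (by omega)] at h1
      rw [List.getLast_eq_getElem]
      exact Option.some_injective _ h1
    -- min? of the abs list via its characterization: membership + lower bound
    have hmin : ∀ (m : Int),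
        (m ∈ vals0.map (fun v => |v|) ∧ ∀ b ∈ vals0.map (fun v => |v|), m ≤ b) →
        (vals0.map (fun v => |v|)).min? = some m :=
      fun m h => List.min?_eq_some_iff_subtype.mpr h
    have hmemiff : ∀ b : Int, b ∈ vals0.map (fun v => |v|) ↔ b ∈ s.map (fun v => |v|) :=
      fun b => ((hperm.map (fun v => |v|)).mem_iff).symm
    have hlastneg : p.getLast hpne < 0 := hp _ (List.getLast_mem hpne)
    by_cases hfull : p.length = s.length
    · -- q is empty: the minimum is |last negative|
      have hmv : (vals0.map (fun v => |v|)).min? = some (-(p.getLast hpne)) := by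
        apply hmin
        constructor
        · rw [hmemiff]
          rw [show -(p.getLast hpne) = |p.getLast hpne| from (abs_of_neg hlastneg).symm]
          refine List.mem_map_of_mem ?_
          have : p.getLast hpne ∈ p := List.getLast_mem hpne
          rw [← hpq]
          exact List.mem_append_left _ this
        · intro b hb
          have hqnil : q = [] := by
            have := congrArg List.length hpq
            simp at this
            exact List.length_eq_zero_iff.mp (by omega)
          rw [hmemiff, ← hpq, hqnil, List.append_nil] at hb
          rcases List.mem_map.mp hb with ⟨x, hx, rfl⟩
          rw [abs_of_neg (hp x hx)]
          exact neg_le_neg (pairwise_le_getLast hsplit.1 hx hpne)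
      rw [if_pos hfull, hmv, hgetL, hsum, hdrop, htake]
      simp
    · -- q is nonempty: the minimum is min(|last negative|, first nonnegative)
      have hqne : q ≠ [] := by
        intro hq0
        apply hfull
        have := congrArg List.length hpq
        simpa [hq0] using this
      have hgetR : PySem.List.pyGetD s (p.length : Int) 0 = q.head hqne := by
        have hlt : p.length < s.length := by
          have := congrArg List.length hpq
          simp at this
          have := List.length_pos_iff.mpr hqne
          omega
        rw [PySem.List.pyGetD_eq_getElem s 0 (by positivity) (by exact_mod_cast hlt)]
        simp only [Int.toNat_natCast]
        have h1 : s[p.length]? = q[p.length - p.length]? := by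
          rw [← hpq]; exact List.getElem?_append_right (le_refl _)
        rw [List.getElem?_eq_getElem (by omega),
          List.getElem?_eq_getElem (by have := List.length_pos_iff.mpr hqne; omega)] at h1
        rw [List.head_eq_getElem]
        have h2 := Option.some_injective _ h1
        simpa using h2
      have hmv : (vals0.map (fun v => |v|)).min? =
          some (min (-(p.getLast hpne)) (q.head hqne)) := by
        apply hmin
        constructor
        · rw [hmemiff, ← hpq, List.map_append]
          rcases le_total (-(p.getLast hpne)) (q.head hqne) with hle | hle
          · rw [min_eq_left hle]
            apply List.mem_append_left
            rw [show -(p.getLast hpne) = |p.getLast hpne| from (abs_of_neg hlastneg).symm]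
            exact List.mem_map_of_mem (List.getLast_mem hpne)
          · rw [min_eq_right hle]
            apply List.mem_append_right
            rw [show q.head hqne = |q.head hqne| from (abs_of_nonneg (hq _ (List.head_mem hqne))).symm]
            exact List.mem_map_of_mem (List.head_mem hqne)
        · intro b hb
          rw [hmemiff, ← hpq, List.map_append] at hb
          rcases List.mem_append.mp hb with hb | hb
          · rcases List.mem_map.mp hb with ⟨x, hx, rfl⟩
            rw [abs_of_neg (hp x hx)]
            exact le_trans (min_le_left _ _) (neg_le_neg (pairwise_le_getLast hsplit.1 hx hpne))
          · rcases List.mem_map.mp hb with ⟨x, hx, rfl⟩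
            rw [abs_of_nonneg (hq x hx)]
            exact le_trans (min_le_right _ _) (head_le_of_pairwise hsplit.2.1 hx hqne)
      rw [if_neg hfull, hmv, hgetL, hgetR, hsum, hdrop, htake]
      simp
  · rw [if_neg hpar, if_neg hpar, hsum, hdrop, htake]
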